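-- pv_equiv track=rewrite | github.com/T-Zeng-Group-TheoChem-YorkU/vhegen | src/vhegen/modules/vibrational.py | assign_indices
-- ===== SOURCE A (Python) =====
-- def assign_indices(modes,modelabels):
--     #label and count each modes
--     posa=[]
--     posb=[]
--     pose=[]
--     modes0=[mode[0] for mode in modes]
--     for i in range(len(modes)):
--         if modes0[i]=='E':
--             pose.append(i)
--         if modes0[i]=='A':
--             posa.append(i)
--         if modes0[i]=='B':
--             posb.append(i)
--
--     indlabels=[]
--     indpos=[]
--     j=0
--     for i in range(len(posa)):
--         indlabels.append(modelabels[posa[i]])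
--         indpos.append(j)
--         j=j+1
--     for i in range(len(posb)):
--         indlabels.append(modelabels[posb[i]])
--         indpos.append(j)
--         j=j+1
--     for i in range(len(pose)):
--         indlabels.append(modelabels[pose[i]])
--         indpos.append(j)
--         j=j+2 #skip K indices because they don't contribute to constraints outside of order
--     return indpos, indlabels
-- ===== SOURCE B (Python) =====
-- def assign_indices(modes, modelabels):
--     # Sort-based reformulation: pack (symmetry rank, original index) into one
--     # comparable integer key, sort once, and compute positions by the closed
--     # form k (non-E block) / 2*k - m (E block) instead of a running counter.
--     n = len(modes)
--     ranks = {'A': 0, 'B': 1, 'E': 2}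
--     keyed = [(ranks[mode[0]], i) for i, mode in enumerate(modes) if mode[0] in ranks]
--     keyed = sorted(keyed, key=lambda t: t[0] * n + t[1])
--     indlabels = [modelabels[i] for _, i in keyed]
--     m = sum(1 for r, _ in keyed if r < 2)
--     indpos = [k if k < m else 2 * k - m for k in range(len(keyed))]
--     return indpos, indlabels
-- ===== Notes on version B (the rewrite author's own statement) =====
-- stated objective: alternative
-- what changed: Instead of A's three bucket lists built by conditional appends plus a running counter j, B sorts the (rank,index) pairs once by a packed integer key rank*len(modes)+index and reads the positions off the closed form k for the non-E block and 2*k-m for the E block (m = number of non-E modes).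
import Mathlib
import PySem

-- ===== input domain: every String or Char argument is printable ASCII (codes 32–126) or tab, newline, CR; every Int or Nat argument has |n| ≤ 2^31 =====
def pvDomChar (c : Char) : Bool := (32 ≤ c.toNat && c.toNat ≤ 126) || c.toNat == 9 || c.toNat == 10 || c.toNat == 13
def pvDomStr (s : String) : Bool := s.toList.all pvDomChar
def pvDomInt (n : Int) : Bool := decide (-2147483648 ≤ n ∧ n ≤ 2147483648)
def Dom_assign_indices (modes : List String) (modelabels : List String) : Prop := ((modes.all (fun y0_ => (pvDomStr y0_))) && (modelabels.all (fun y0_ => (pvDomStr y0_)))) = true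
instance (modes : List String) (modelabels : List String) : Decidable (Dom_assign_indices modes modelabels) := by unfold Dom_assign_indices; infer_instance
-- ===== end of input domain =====

-- B replaces A's three bucket lists + running counter by one sort of (rank, index) pairs
-- under a packed integer key and a closed-form position formula (alternative algorithm, similar cost).


-- ===== PORT A =====
-- A's single classification loop over range(len(modes)): three ifs, three lists.
def pvStepA (st : List Int × List Int × List Int) (p : Int × Char) : List Int × List Int × List Int :=
  let pe := if p.2 = 'E' then st.2.2 ++ [p.1] else st.2.2
  let pa := if p.2 = 'A' then st.1 ++ [p.1] else st.1
  let pb := if p.2 = 'B' then st.2.1 ++ [p.1] else st.2.1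
  (pa, pb, pe)

-- A's second-phase loop body: append label and current j, then j += w (w = 1 for A/B, 2 for E).
def pvLoopA (modelabels : List String) (w : Int) (st : List String × List Int × Int) (i : Int) :
    List String × List Int × Int :=
  (st.1 ++ [PySem.List.pyGetD modelabels i ""], st.2.1 ++ [st.2.2], st.2.2 + w)

def assign_indices (modes : List String) (modelabels : List String) : List Int × List String :=
  -- modes0 = [mode[0] for mode in modes]; empty modes are excluded by Pre_ (IndexError)
  let modes0 : List Char := modes.map (fun m => (PySem.Str.pyGet? m 0).getD ' ')
  let g := (PySem.List.enumerate modes0).foldl pvStepA ([], [], [])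
  let s1 := g.1.foldl (pvLoopA modelabels 1) ([], [], 0)
  let s2 := g.2.1.foldl (pvLoopA modelabels 1) s1
  let s3 := g.2.2.foldl (pvLoopA modelabels 2) s2
  (s3.2.1, s3.1)

-- ===== PORT B =====
-- the dict ranks = {'A': 0, 'B': 1, 'E': 2}: ranks[c] / c in ranks
def pvRank? (c : Char) : Option Int :=
  if c = 'A' then some 0 else if c = 'B' then some 1 else if c = 'E' then some 2 else none

def assign_indices_alt (modes : List String) (modelabels : List String) : List Int × List String :=
  let n : Int := (modes.length : Int)
  -- keyed = [(ranks[mode[0]], i) for i, mode in enumerate(modes) if mode[0] in ranks]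
  let keyed0 := (PySem.List.enumerate modes).filterMap
      (fun p => (pvRank? ((PySem.Str.pyGet? p.2 0).getD ' ')).map (fun r => (r, p.1)))
  -- keyed = sorted(keyed, key=lambda t: t[0] * n + t[1])
  let keyed := PySem.List.sorted keyed0 (fun q => q.1 * n + q.2) false
  let indlabels := keyed.map (fun q => PySem.List.pyGetD modelabels q.2 "")
  -- m = sum(1 for r, _ in keyed if r < 2)   (a 0/1-sum is countP)
  let m : Int := (keyed.countP (fun q => decide (q.1 < 2)) : Int)
  -- indpos = [k if k < m else 2*k - m for k in range(len(keyed))]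
  let indpos := (PySem.List.pyRange 0 (keyed.length : Int) 1).map
      (fun k => if k < m then k else 2 * k - m)
  (indpos, indlabels)

-- ===== PRECONDITION & SPEC =====
-- Pre_ excludes exactly the inputs where Python A raises: an empty mode string (IndexError in
-- the mode[0] comprehension) or a mode starting with 'A'/'B'/'E' whose index is out of range
-- for modelabels (IndexError on modelabels[...]).
def Pre_assign_indices (modes : List String) (modelabels : List String) : Prop :=
  ∀ p ∈ PySem.List.enumerate modes,
    p.2 ≠ "" ∧
    (PySem.Str.pyGet? p.2 0 ∈ ([some 'A', some 'B', some 'E'] : List (Option Char)) →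
      p.1 < (modelabels.length : Int))
instance (modes : List String) (modelabels : List String) : Decidable (Pre_assign_indices modes modelabels) := by unfold Pre_assign_indices; infer_instance

def pvWitness_assign_indices : List String × List String := (["A1", "E2", "B1"], ["nu1", "nu2", "nu3"])

def Spec_assign_indices (modes : List String) (modelabels : List String) (out : List Int × List String) : Prop := out = assign_indices_alt modes modelabels
instance (modes : List String) (modelabels : List String) (out : List Int × List String) : Decidable (Spec_assign_indices modes modelabels out) := by unfold Spec_assign_indices; infer_instance

-- ===== CLAIM (what is proved, stated in full; the proofs are below) =====
def Claim_equal_assign_indices : Prop := ∀ (modes : List String) (modelabels : List String), Dom_assign_indices modes modelabels → Pre_assign_indices modes modelabels → Spec_assign_indices modes modelabels (assign_indices modes modelabels)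

-- ===== LEMMAS AND PROOFS =====

-- positions j, j+w, j+2w, …, j+(n-1)w
def pvPosSeq (j w : Int) : Nat → List Int
  | 0 => []
  | n + 1 => j :: pvPosSeq (j + w) w n

theorem pvPosSeq_eq (j w : Int) (n : Nat) :
    pvPosSeq j w n = (List.range n).map (fun t : Nat => j + w * (t : Int)) := by
  induction n generalizing j with
  | zero => rfl
  | succ n ih =>
      rw [List.range_succ_eq_map]
      simp only [pvPosSeq, ih, List.map_cons, List.map_map, Nat.cast_zero, mul_zero, add_zero]
      refine congrArg₂ _ rfl (List.map_congr_left ?_)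
      intro t _
      simp only [Function.comp_apply]
      push_cast; ring

-- A's second-phase loop, characterised.
theorem pvLoopA_spec (ml : List String) (w : Int) (l : List Int) (acc : List String)
    (pos : List Int) (j : Int) :
    l.foldl (pvLoopA ml w) (acc, pos, j)
      = (acc ++ l.map (fun i => PySem.List.pyGetD ml i ""),
         pos ++ pvPosSeq j w l.length, j + w * l.length) := by
  induction l generalizing acc pos j with
  | nil => simp [pvPosSeq]
  | cons i l ih =>
      simp only [List.foldl_cons, pvLoopA, ih, List.map_cons, List.length_cons, pvPosSeq]
      refine congrArg₂ _ (by simp) (congrArg₂ _ (by simp) ?_)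
      push_cast; ring

-- A's classification fold splits into three filtered-append folds.
theorem pvStepA_split (l : List (Int × Char)) (a b e : List Int) :
    l.foldl pvStepA (a, b, e)
      = (a ++ ((l.filter (fun p => decide (p.2 = 'A'))).map (·.1)),
         b ++ ((l.filter (fun p => decide (p.2 = 'B'))).map (·.1)),
         e ++ ((l.filter (fun p => decide (p.2 = 'E'))).map (·.1))) := by
  induction l generalizing a b e with
  | nil => simp
  | cons p l ih =>
      simp only [List.foldl_cons, pvStepA, ih, List.filter_cons]
      by_cases hA : p.2 = 'A' <;> by_cases hB : p.2 = 'B' <;> by_cases hE : p.2 = 'E' <;>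
        simp_all

-- enumerate over a mapped list
theorem pvEnumMap {α β : Type} (g : α → β) (l : List α) (s : Int) :
    PySem.List.enumerate (l.map g) s = (PySem.List.enumerate l s).map (fun p => (p.1, g p.2)) := by
  induction l generalizing s with
  | nil => rfl
  | cons x l ih => simp [PySem.List.enumerate_cons, ih]

-- B's keyed comprehension, re-expressed over the first-character list A also reads.
theorem pvKeyed_bridge (modes : List String) :
    (PySem.List.enumerate modes).filterMap
        (fun p => (pvRank? ((PySem.Str.pyGet? p.2 0).getD ' ')).map (fun r => (r, p.1)))
      = (PySem.List.enumerate (modes.map (fun m => (PySem.Str.pyGet? m 0).getD ' '))).filterMap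
        (fun p => (pvRank? p.2).map (fun r => (r, p.1))) := by
  rw [pvEnumMap, List.filterMap_map]
  rfl

-- B's keyed list, filtered on one rank value, is the corresponding character filter.
theorem pvKeyed_filter (l : List (Int × Char)) (j : Int) (ch : Char)
    (h : ∀ c : Char, pvRank? c = some j ↔ c = ch) :
    ((l.filterMap (fun p => (pvRank? p.2).map (fun r => (r, p.1)))).filter
        (fun q => decide (q.1 = j)))
      = (l.filter (fun p => decide (p.2 = ch))).map (fun p => (j, p.1)) := by
  induction l with
  | nil => rfl
  | cons p l ih =>
      simp only [List.filterMap_cons, List.filter_cons]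
      cases hc : pvRank? p.2 with
      | none =>
          have hne : ¬ (p.2 = ch) := fun hx => by rw [hx, h ch |>.mpr rfl] at hc; simp at hc
          simp [hne, ih]
      | some r =>
          by_cases hr : r = j
          · have hch : p.2 = ch := (h _).mp (hr ▸ hc)
            simp [hr, hch, ih]
          · have hne : ¬ (p.2 = ch) := fun hx => by
              rw [hx, (h ch).mpr rfl] at hc
              exact hr (by injection hc with hh; omega)
            simp [hr, hne, ih]

theorem pvRankA : ∀ c : Char, pvRank? c = some 0 ↔ c = 'A' := by
  intro c; unfold pvRank?; split_ifs <;> simp_all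

theorem pvRankB : ∀ c : Char, pvRank? c = some 1 ↔ c = 'B' := by
  intro c; unfold pvRank?; split_ifs <;> simp_all

theorem pvRankE : ∀ c : Char, pvRank? c = some 2 ↔ c = 'E' := by
  intro c; unfold pvRank?; split_ifs <;> simp_all

-- every keyed pair has rank 0/1/2 and an enumerate index in [0, len)
theorem pvKeyed_mem (xs : List Char) (q : Int × Int)
    (hq : q ∈ (PySem.List.enumerate xs).filterMap
        (fun p => (pvRank? p.2).map (fun r => (r, p.1)))) :
    (q.1 = 0 ∨ q.1 = 1 ∨ q.1 = 2) ∧ 0 ≤ q.2 ∧ q.2 < (xs.length : Int) := by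
  rw [List.mem_filterMap] at hq
  obtain ⟨p, hp, hf⟩ := hq
  rw [PySem.List.mem_enumerate_iff] at hp
  obtain ⟨k, hk, rfl⟩ := hp
  cases hc : pvRank? ((0 + (k:Int), xs[k]).2) with
  | none => rw [hc] at hf; simp at hf
  | some r =>
      rw [hc] at hf
      simp only [Option.map_some, Option.some_inj] at hf
      subst hf
      constructor
      · unfold pvRank? at hc
        split_ifs at hc <;> simp_all
      · exact ⟨by simp, by simpa using hk⟩

-- the keyed list is a permutation of its three rank blocks
theorem pvKeyed_perm (xs : List Char) :
    (((PySem.List.enumerate xs).filterMap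
        (fun p => (pvRank? p.2).map (fun r => (r, p.1)))).filter (fun q => decide (q.1 = 0))
      ++ ((PySem.List.enumerate xs).filterMap
        (fun p => (pvRank? p.2).map (fun r => (r, p.1)))).filter (fun q => decide (q.1 = 1))
      ++ ((PySem.List.enumerate xs).filterMap
        (fun p => (pvRank? p.2).map (fun r => (r, p.1)))).filter (fun q => decide (q.1 = 2))).Perm
      ((PySem.List.enumerate xs).filterMap
        (fun p => (pvRank? p.2).map (fun r => (r, p.1)))) := by
  set K := (PySem.List.enumerate xs).filterMap
      (fun p => (pvRank? p.2).map (fun r => (r, p.1))) with hK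
  have h01 : (K.filter (fun q => !decide (q.1 = 0))).filter (fun q => decide (q.1 = 1))
      = K.filter (fun q => decide (q.1 = 1)) := by
    rw [List.filter_filter]
    refine List.filter_congr ?_
    intro q _
    by_cases h1 : q.1 = 1 <;> simp [h1]
  have h2 : (K.filter (fun q => !decide (q.1 = 0))).filter (fun q => !decide (q.1 = 1))
      = K.filter (fun q => decide (q.1 = 2)) := by
    rw [List.filter_filter]
    refine List.filter_congr ?_
    intro q hq
    have := (pvKeyed_mem xs q (hK ▸ hq)).1
    rcases this with h | h | h <;> simp [h]
  have p1 : (K.filter (fun q => decide (q.1 = 1))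
      ++ K.filter (fun q => decide (q.1 = 2))).Perm (K.filter (fun q => !decide (q.1 = 0))) := by
    rw [← h01, ← h2]
    exact List.filter_append_perm _ _
  refine List.Perm.trans ?_ (List.filter_append_perm (fun q => decide (q.1 = 0)) K)
  rw [List.append_assoc]
  exact List.Perm.append_left _ p1

-- sorting by the packed key rank*len + index yields the three rank blocks in order
theorem pvKeyed_sorted (xs : List Char) (n : Int) (hn : (xs.length : Int) ≤ n) :
    PySem.List.sorted
        ((PySem.List.enumerate xs).filterMap
          (fun p => (pvRank? p.2).map (fun r => (r, p.1))))
        (fun q => q.1 * n + q.2) false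
      = ((PySem.List.enumerate xs).filterMap
          (fun p => (pvRank? p.2).map (fun r => (r, p.1)))).filter (fun q => decide (q.1 = 0))
        ++ ((PySem.List.enumerate xs).filterMap
          (fun p => (pvRank? p.2).map (fun r => (r, p.1)))).filter (fun q => decide (q.1 = 1))
        ++ ((PySem.List.enumerate xs).filterMap
          (fun p => (pvRank? p.2).map (fun r => (r, p.1)))).filter (fun q => decide (q.1 = 2)) := by
  set K := (PySem.List.enumerate xs).filterMap
      (fun p => (pvRank? p.2).map (fun r => (r, p.1))) with hK
  refine PySem.List.sorted_eq_of_perm_of_pairwise_lt _ _ _ (pvKeyed_perm xs) ?_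
  have hmemK : ∀ q ∈ K, (q.1 = 0 ∨ q.1 = 1 ∨ q.1 = 2) ∧ 0 ≤ q.2 ∧ q.2 < (xs.length : Int) :=
    fun q hq => pvKeyed_mem xs q (hK ▸ hq)
  have hPW : K.Pairwise (fun a b => a.2 < b.2) := by
    rw [hK, List.pairwise_filterMap]
    refine List.Pairwise.imp_of_mem ?_ (PySem.List.pairwise_lt_enumerate xs 0)
    intro a b _ _ hab x hx y hy
    rcases Option.map_eq_some_iff.mp hx with ⟨r, hr, rfl⟩
    rcases Option.map_eq_some_iff.mp hy with ⟨s, hs, rfl⟩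
    simpa using hab
  have hf : ∀ (j : Int), (K.filter (fun q => decide (q.1 = j))).Pairwise (fun a b => a.2 < b.2) :=
    fun j => hPW.filter _
  have hfst : ∀ (j : Int) (q : Int × Int), q ∈ K.filter (fun q => decide (q.1 = j)) →
      q.1 = j ∧ 0 ≤ q.2 ∧ q.2 < (xs.length : Int) := by
    intro j q hq
    rw [List.mem_filter] at hq
    exact ⟨by simpa using hq.2, (hmemK q hq.1).2⟩
  rw [List.pairwise_append, List.pairwise_append]
  refine ⟨⟨(hf 0).imp_of_mem ?_, (hf 1).imp_of_mem ?_, ?_⟩, (hf 2).imp_of_mem ?_, ?_⟩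
  · intro a b ha hb hab
    have h1 := hfst 0 a ha; have h2 := hfst 0 b hb
    rw [h1.1, h2.1]; omega
  · intro a b ha hb hab
    have h1 := hfst 1 a ha; have h2 := hfst 1 b hb
    rw [h1.1, h2.1]; omega
  · intro a ha b hb
    have h1 := hfst 0 a ha; have h2 := hfst 1 b hb
    rw [h1.1, h2.1]; omega
  · intro a b ha hb hab
    have h1 := hfst 2 a ha; have h2 := hfst 2 b hb
    rw [h1.1, h2.1]; omega
  · intro a ha b hb
    have h2 := hfst 2 b hb
    rw [List.mem_append] at ha
    rcases ha with ha | ha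
    · have h1 := hfst 0 a ha
      rw [h1.1, h2.1]; omega
    · have h1 := hfst 1 a ha
      rw [h1.1, h2.1]; omega

-- B's closed-form position comprehension equals A's three counter segments.
theorem pvPos_formula (na nb ne : Nat) :
    (PySem.List.pyRange 0 ((na : Int) + (nb : Int) + (ne : Int)) 1).map
        (fun k => if k < (na : Int) + (nb : Int) then k else 2 * k - ((na : Int) + (nb : Int)))
      = pvPosSeq 0 1 na ++ pvPosSeq (na : Int) 1 nb ++ pvPosSeq ((na : Int) + (nb : Int)) 2 ne := by
  have h1 : ((na : Int) + (nb : Int) + (ne : Int)) = ((na + nb + ne : Nat) : Int) := by push_cast; ring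
  rw [h1, PySem.List.pyRange_one]
  have h2 : (((na + nb + ne : Nat) : Int) - 0).toNat = na + nb + ne := by omega
  rw [h2, List.range_add, List.range_add]
  simp only [List.map_append, List.map_map, pvPosSeq_eq]
  refine congrArg₂ _ (congrArg₂ _ ?_ ?_) ?_
  · refine List.map_congr_left ?_
    intro t ht
    rw [List.mem_range] at ht
    simp only [Function.comp_apply]
    rw [if_pos (by omega)]
    ring
  · refine List.map_congr_left ?_
    intro t ht
    rw [List.mem_range] at ht
    simp only [Function.comp_apply]
    rw [if_pos (by push_cast; omega)]
    push_cast; ring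
  · refine List.map_congr_left ?_
    intro t ht
    rw [List.mem_range] at ht
    simp only [Function.comp_apply]
    rw [if_neg (by push_cast; omega)]
    push_cast; ring

-- ===== VERDICT (by name: the statement is the Claim_ definition above) =====
theorem assign_indices_spec : Claim_equal_assign_indices := by
  intro modes modelabels _ _
  simp only [Spec_assign_indices, assign_indices, assign_indices_alt]
  rw [pvKeyed_bridge, pvKeyed_sorted _ (modes.length : Int) (by simp),
    pvKeyed_filter _ 0 'A' pvRankA, pvKeyed_filter _ 1 'B' pvRankB, pvKeyed_filter _ 2 'E' pvRankE,
    pvStepA_split]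
  simp only [List.nil_append, pvLoopA_spec, List.map_append, List.map_map, List.length_map,
    List.length_append, List.countP_append, List.countP_map]
  simp only [Function.comp_def]
  simp
  rw [pvPos_formula, List.append_assoc]
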